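-- pv_equiv track=rewrite | github.com/umpawlis/MastersProject | SequenceService.py | formatAllOperons
-- ===== SOURCE A (Python) =====
-- def reverseSequence(operon):
--     if '-' in operon:
--         return True
--     return False
--
-- def formatAllOperons(sequence):
--     sequenceList = []
--     operonIndexConversions = []
--     operonIndex = 0
--
--     for operon1 in sequence:
--         reverseOp = reverseSequence(operon1)
--
--         operon1 = operon1.replace('-', '')
--         operon1 = operon1.replace('[', '')
--         operon1 = operon1.replace(']', '')
--
--         operon1List = operon1.split(',')
--
--         if len(operon1List) > 1:
--             noWhiteSpaceOperon1List = []
--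
--             for op in operon1List:
--                 noWhiteSpaceOperon1List.append(op.strip())
--
--             if reverseOp:
--                 noWhiteSpaceOperon1List.reverse()
--             sequenceList.append(noWhiteSpaceOperon1List)
--             operonIndexConversions.append(operonIndex)
--             operonIndex += 1
--         else:
--             operonIndexConversions.append(-1)
--
--     return sequenceList, operonIndexConversions
-- ===== SOURCE B (Python) =====
-- def formatAllOperons(sequence):
--     def parse(s):
--         # single character-level state machine: build tokens directly,
--         # skipping '[' and ']', recording '-' as a reverse flag
--         tokens = []
--         cur = []
--         rev = False
--         for ch in s:
--             if ch == ',':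
--                 tokens.append(''.join(cur).strip())
--                 cur = []
--             elif ch == '-':
--                 rev = True
--             elif ch != '[' and ch != ']':
--                 cur.append(ch)
--         tokens.append(''.join(cur).strip())
--         return tokens[::-1] if rev else tokens
--
--     flags = [',' in s for s in sequence]
--     sequenceList = [parse(s) for s, f in zip(sequence, flags) if f]
--     operonIndexConversions = [flags[:i].count(True) if f else -1
--                               for i, f in enumerate(flags)]
--     return sequenceList, operonIndexConversions
-- ===== Notes on version B (the rewrite author's own statement) =====
-- stated objective: alternative
-- what changed: B parses each operon with a single character-level state machine (tokens built in one scan, '[' and ']' skipped, '-' recorded as a reverse flag) instead of A's replace/replace/replace/split/strip pipeline, tests validity by ',' membership instead of the split length, and derives the index conversions from prefix counts of a validity-flag list instead of A's interleaved counter.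
import Mathlib
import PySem

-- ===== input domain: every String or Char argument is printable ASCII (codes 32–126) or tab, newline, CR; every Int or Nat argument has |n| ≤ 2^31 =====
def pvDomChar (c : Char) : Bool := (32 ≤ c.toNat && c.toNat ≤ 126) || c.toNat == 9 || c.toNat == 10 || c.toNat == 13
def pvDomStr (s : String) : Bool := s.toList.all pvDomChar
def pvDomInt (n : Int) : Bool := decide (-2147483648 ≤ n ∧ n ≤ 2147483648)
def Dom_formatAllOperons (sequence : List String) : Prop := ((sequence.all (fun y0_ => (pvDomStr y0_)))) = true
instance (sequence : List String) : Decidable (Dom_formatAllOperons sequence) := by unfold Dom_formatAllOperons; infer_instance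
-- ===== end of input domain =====

-- B replaces A's replace/replace/replace/split/strip pipeline with a single character-level state
-- machine per operon (tokens built in one scan, '-' recorded as a reverse flag), tests validity by
-- ',' membership, and derives the index conversions from prefix counts of a validity-flag list.

-- ===== PORT A =====
def reverseSequence (operon : String) : Bool :=
  if PySem.Str.isIn "-" operon then true else false

def formatAllOperonsStep (st : List (List String) × List Int × Int) (operon1 : String) :
    List (List String) × List Int × Int :=
  let reverseOp := reverseSequence operon1
  let o1 := PySem.Str.replace operon1 "-" ""
  let o2 := PySem.Str.replace o1 "[" ""
  let o3 := PySem.Str.replace o2 "]" ""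
  -- operon1.split(','): sep "," is nonempty so split? is some here
  let operon1List := (PySem.Str.split? o3 ",").getD []
  if operon1List.length > 1 then
    let noWhiteSpace := operon1List.foldl (fun acc op => acc ++ [PySem.Str.strip op]) []
    let noWhiteSpace := if reverseOp then noWhiteSpace.reverse else noWhiteSpace
    (st.1 ++ [noWhiteSpace], st.2.1 ++ [st.2.2], st.2.2 + 1)
  else
    (st.1, st.2.1 ++ [(-1 : Int)], st.2.2)

def formatAllOperons (sequence : List String) : List (List String) × List Int :=
  let r := sequence.foldl formatAllOperonsStep ([], [], 0)
  (r.1, r.2.1)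

-- ===== PORT B =====
-- inner loop of parse(s): state (tokens, cur, rev); ''.join(cur).strip() = Str.strip (String.ofList cur)
def pvScanStep (st : List String × List Char × Bool) (ch : Char) : List String × List Char × Bool :=
  if ch = ',' then (st.1 ++ [PySem.Str.strip (String.ofList st.2.1)], [], st.2.2)
  else if ch = '-' then (st.1, st.2.1, true)
  else if ch ≠ '[' ∧ ch ≠ ']' then (st.1, st.2.1 ++ [ch], st.2.2)
  else st

-- parse(s); tokens[::-1] is List.reverse
def pvParse (s : String) : List String :=
  let r := s.toList.foldl pvScanStep ([], [], false)
  let tokens := r.1 ++ [PySem.Str.strip (String.ofList r.2.1)]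
  if r.2.2 then tokens.reverse else tokens

def formatAllOperons_alt (sequence : List String) : List (List String) × List Int :=
  let flags := sequence.map (fun s => PySem.Str.isIn "," s)
  let sequenceList := ((sequence.zip flags).filter (fun p => p.2)).map (fun p => pvParse p.1)
  -- flags[:i].count(True): slice + list.count
  let operonIndexConversions := (PySem.List.enumerate flags).map (fun p =>
      if p.2 then ((PySem.List.slice flags none (some p.1)).count true : Int) else -1)
  (sequenceList, operonIndexConversions)

-- ===== PRECONDITION & SPEC =====
def Spec_formatAllOperons (sequence : List String) (out : List (List String) × List Int) : Prop := out = formatAllOperons_alt sequence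
instance (sequence : List String) (out : List (List String) × List Int) : Decidable (Spec_formatAllOperons sequence out) := by unfold Spec_formatAllOperons; infer_instance

-- ===== CLAIM (what is proved, stated in full; the proofs are below) =====
def Claim_equal_formatAllOperons : Prop := ∀ (sequence : List String), Dom_formatAllOperons sequence → Spec_formatAllOperons sequence (formatAllOperons sequence)

-- ===== LEMMAS AND PROOFS =====

-- kept characters of A's three replace calls
def pvKeep (c : Char) : Bool := (c != '-' && c != '[') && c != ']'

-- the comma chunks of a character list, cur = chars of the open chunk
def pvChunks : List Char → List Char → List (List Char)
  | [], cur => [cur]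
  | c :: rest, cur => if c = ',' then cur :: pvChunks rest [] else pvChunks rest (cur ++ [c])

def pvFin (cur : List Char) : String := PySem.Str.strip (String.ofList cur)

lemma pv_replace_go_single (c : Char) :
    ∀ (fuel : Nat) (l acc : List Char), l.length ≤ fuel →
      PySem.Chars.replace.go [c] [] fuel l acc = acc.reverse ++ l.filter (fun x => x != c) := by
  intro fuel
  induction fuel with
  | zero =>
    intro l acc h
    have : l = [] := List.length_eq_zero_iff.mp (Nat.le_zero.mp h)
    subst this
    simp [PySem.Chars.replace.go]
  | succ n ih =>
    intro l acc h
    cases l with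
    | nil => simp [PySem.Chars.replace.go]
    | cons x t =>
      by_cases hx : x = c
      · subst hx
        have hpre : List.isPrefixOf [x] (x :: t) = true := by
          simp [List.isPrefixOf]
        simp only [PySem.Chars.replace.go, hpre, if_pos]
        rw [show List.drop [x].length (x :: t) = t from rfl, List.reverse_nil, List.nil_append]
        rw [ih t acc (by simpa using Nat.le_of_succ_le_succ h)]
        simp
      · have hpre : List.isPrefixOf [c] (x :: t) = false := by
          simp [List.isPrefixOf]
          exact fun hc => hx hc.symm
        simp only [PySem.Chars.replace.go, hpre]
        rw [if_neg (by simp)]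
        rw [ih t (x :: acc) (by simpa using Nat.le_of_succ_le_succ h)]
        simp [hx]
  
lemma pv_replace_single (s : List Char) (c : Char) :
    PySem.Chars.replace s [c] [] = s.filter (fun x => x != c) := by
  unfold PySem.Chars.replace
  rw [if_neg (by simp)]
  simpa using pv_replace_go_single c s.length s [] le_rfl

-- A's three replace calls = one filter by pvKeep
lemma pv_clean_eq (s : String) :
    (PySem.Str.replace (PySem.Str.replace (PySem.Str.replace s "-" "") "[" "") "]" "").toList
      = s.toList.filter pvKeep := by
  rw [PySem.Str.toList_replace, PySem.Str.toList_replace, PySem.Str.toList_replace]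
  show PySem.Chars.replace (PySem.Chars.replace (PySem.Chars.replace s.toList ['-'] [])
        ['['] []) [']'] [] = _
  rw [pv_replace_single, pv_replace_single, pv_replace_single, List.filter_filter,
     List.filter_filter]
  apply List.filter_congr
  intro a _
  simp only [pvKeep, Bool.and_assoc, Bool.and_comm]

lemma pv_splitOn_go_comma :
    ∀ (fuel : Nat) (l curR : List Char) (acc : List (List Char)),
      l.length + 1 ≤ fuel →
      PySem.Chars.splitOn.go [','] fuel l curR acc = acc.reverse ++ pvChunks l curR.reverse := by
  intro fuel
  induction fuel with
  | zero => intro l curR acc h; omega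
  | succ n ih =>
    intro l curR acc h
    cases l with
    | nil => simp [PySem.Chars.splitOn.go, pvChunks]
    | cons x t =>
      by_cases hx : x = ','
      · subst hx
        have hpre : List.isPrefixOf [','] (',' :: t) = true := by simp [List.isPrefixOf]
        simp only [PySem.Chars.splitOn.go, hpre, if_pos]
        rw [show List.drop [','].length (',' :: t) = t from rfl]
        rw [ih t [] (curR.reverse :: acc) (by simpa using Nat.le_of_succ_le_succ h)]
        simp [pvChunks]
      · have hpre : List.isPrefixOf [','] (x :: t) = false := by
          simp [List.isPrefixOf]
          exact fun hc => hx hc.symm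
        simp only [PySem.Chars.splitOn.go, hpre]
        rw [if_neg (by simp)]
        rw [ih t (x :: curR) acc (by simpa using Nat.le_of_succ_le_succ h)]
        simp [pvChunks, hx]

lemma pv_splitOn_comma (cs : List Char) :
    PySem.Chars.splitOn cs [','] = pvChunks cs [] := by
  unfold PySem.Chars.splitOn
  simpa using pv_splitOn_go_comma (cs.length + 1) cs [] [] le_rfl

lemma pv_chunks_length (l : List Char) : ∀ cur, (pvChunks l cur).length = l.count ',' + 1 := by
  induction l with
  | nil => intro cur; simp [pvChunks]
  | cons x t ih =>
    intro cur
    by_cases hx : x = ','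
    · subst hx; simp [pvChunks, ih]
    · simp [pvChunks, hx, ih]

lemma pv_isIn_single (c : Char) (sub s : String) (hc : sub.toList = [c]) :
    PySem.Str.isIn sub s = s.toList.contains c := by
  cases h : s.toList.contains c
  · rw [Bool.eq_false_iff]
    intro hin
    have := (PySem.Str.isIn_iff_infix sub s).mp hin
    rw [hc] at this
    have : c ∈ s.toList := (List.singleton_infix_iff c s.toList).mp this
    simp [List.contains_eq_mem] at h
    exact h this
  · refine (PySem.Str.isIn_iff_infix sub s).mpr ?_
    rw [hc]
    refine (List.singleton_infix_iff c s.toList).mpr ?_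
    simpa [List.contains_eq_mem] using h

-- B's per-character scan, run to the end, produces the stripped comma chunks of the
-- pvKeep-filtered characters and the '-'-membership flag
lemma pv_scan_fold (cs : List Char) :
    ∀ (toks : List String) (cur : List Char) (rev : Bool),
      (cs.foldl pvScanStep (toks, cur, rev)).1
          ++ [pvFin (cs.foldl pvScanStep (toks, cur, rev)).2.1]
        = toks ++ (pvChunks (cs.filter pvKeep) cur).map pvFin
      ∧ (cs.foldl pvScanStep (toks, cur, rev)).2.2 = (rev || cs.contains '-') := by
  induction cs with
  | nil => intro toks cur rev; simp [pvChunks, pvFin]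
  | cons ch rest ih =>
    intro toks cur rev
    by_cases h1 : ch = ','
    · subst h1
      have hstep : pvScanStep (toks, cur, rev) ',' =
          (toks ++ [PySem.Str.strip (String.ofList cur)], [], rev) := by simp [pvScanStep]
      simp only [List.foldl_cons, hstep]
      rcases ih (toks ++ [PySem.Str.strip (String.ofList cur)]) [] rev with ⟨h1', h2'⟩
      refine ⟨?_, by simpa using h2'⟩
      rw [h1']
      simp [pvKeep, pvChunks, pvFin]
    · by_cases h2 : ch = '-'
      · subst h2
        have hstep : pvScanStep (toks, cur, rev) '-' = (toks, cur, true) := by simp [pvScanStep]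
        simp only [List.foldl_cons, hstep]
        rcases ih toks cur true with ⟨h1', h2'⟩
        refine ⟨?_, by simp [h2']⟩
        rw [h1']
        simp [pvKeep]
      · by_cases h3 : ch ≠ '[' ∧ ch ≠ ']'
        · have hstep : pvScanStep (toks, cur, rev) ch = (toks, cur ++ [ch], rev) := by
            simp [pvScanStep, h1, h2, h3]
          simp only [List.foldl_cons, hstep]
          rcases ih toks (cur ++ [ch]) rev with ⟨h1', h2'⟩
          refine ⟨?_, by simp [h2', Ne.symm h2]⟩
          rw [h1']
          have hk : pvKeep ch = true := by simp [pvKeep, h2, h3.1, h3.2]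
          simp [hk, pvChunks, h1]
        · have hstep : pvScanStep (toks, cur, rev) ch = (toks, cur, rev) := by
            simp [pvScanStep, h1, h2, h3]
          simp only [List.foldl_cons, hstep]
          rcases ih toks cur rev with ⟨h1', h2'⟩
          have hk : pvKeep ch = false := by
            rcases not_and_or.mp h3 with h | h <;>
              simp [pvKeep, not_not.mp h]
          refine ⟨?_, by simp [h2', Ne.symm h2]⟩
          rw [h1']
          simp [hk]

-- A's cleaned-split-strip token list (before reversal) equals B's scan for every string
lemma pv_split_eq (s : String) :
    PySem.Str.split? (PySem.Str.replace (PySem.Str.replace (PySem.Str.replace s "-" "")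
        "[" "") "]" "") ","
      = some ((pvChunks (s.toList.filter pvKeep) []).map String.ofList) := by
  unfold PySem.Str.split? PySem.Chars.split?
  rw [if_neg (by decide)]
  rw [pv_clean_eq s, show (",".toList) = [','] from by decide, pv_splitOn_comma]
  rfl

lemma pv_tokens_eq (s : String) :
    ((PySem.Str.split? (PySem.Str.replace (PySem.Str.replace (PySem.Str.replace s "-" "")
        "[" "") "]" "") ",").getD []).map PySem.Str.strip
      = (pvChunks (s.toList.filter pvKeep) []).map pvFin := by
  rw [pv_split_eq s, Option.getD_some, List.map_map]
  rfl

-- A's validity test = B's flag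
lemma pv_valid_iff (s : String) :
    (((PySem.Str.split? (PySem.Str.replace (PySem.Str.replace (PySem.Str.replace s "-" "")
        "[" "") "]" "") ",").getD []).length > 1)
      ↔ PySem.Str.isIn "," s = true := by
  have hl : ((PySem.Str.split? (PySem.Str.replace (PySem.Str.replace (PySem.Str.replace s "-" "")
      "[" "") "]" "") ",").getD []).length = (s.toList.filter pvKeep).count ',' + 1 := by
    have h := congrArg List.length (pv_tokens_eq s)
    simpa [pv_chunks_length] using h
  have hmem : ',' ∈ s.toList.filter pvKeep ↔ ',' ∈ s.toList := by
    simp [List.mem_filter, show pvKeep ',' = true from by decide]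
  rw [pv_isIn_single ',' "," s (by decide), hl]
  constructor
  · intro hgt
    have h0 : 0 < (s.toList.filter pvKeep).count ',' := by omega
    have := hmem.mp (List.count_pos_iff.mp h0)
    simpa using this
  · intro hflag
    have hm : ',' ∈ s.toList := by simpa using hflag
    have := List.count_pos_iff.mpr (hmem.mpr hm)
    omega

-- A's per-operon token list equals B's pvParse, for every string
lemma pv_parse_eq (s : String) :
    (if reverseSequence s then
        (((PySem.Str.split? (PySem.Str.replace (PySem.Str.replace (PySem.Str.replace s "-" "")
          "[" "") "]" "") ",").getD []).foldl (fun acc op => acc ++ [PySem.Str.strip op]) []).reverse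
      else
        ((PySem.Str.split? (PySem.Str.replace (PySem.Str.replace (PySem.Str.replace s "-" "")
          "[" "") "]" "") ",").getD []).foldl (fun acc op => acc ++ [PySem.Str.strip op]) [])
      = pvParse s := by
  have htoks : ((PySem.Str.split? (PySem.Str.replace (PySem.Str.replace (PySem.Str.replace s "-" "")
      "[" "") "]" "") ",").getD []).foldl (fun acc op => acc ++ [PySem.Str.strip op]) []
      = (pvChunks (s.toList.filter pvKeep) []).map pvFin := by
    rw [PySem.List.foldl_append_singleton_eq_map, List.nil_append, pv_tokens_eq]
  have hrev : reverseSequence s = s.toList.contains '-' := by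
    unfold reverseSequence
    rw [pv_isIn_single '-' "-" s (by decide)]
    cases s.toList.contains '-' <;> simp
  rcases pv_scan_fold s.toList [] [] false with ⟨hs1, hs2⟩
  unfold pvParse
  rw [htoks, hrev]
  simp only [List.nil_append] at hs1
  show _ = (if (s.toList.foldl pvScanStep ([], [], false)).2.2 = true
      then ((s.toList.foldl pvScanStep ([], [], false)).1
            ++ [pvFin (s.toList.foldl pvScanStep ([], [], false)).2.1]).reverse
      else (s.toList.foldl pvScanStep ([], [], false)).1
            ++ [pvFin (s.toList.foldl pvScanStep ([], [], false)).2.1])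
  rw [hs1, hs2, Bool.false_or]

-- the interleaved counter of A, described structurally
def pvConvWith : List String → Int → List Int
  | [], _ => []
  | s :: rest, idx =>
    if PySem.Str.isIn "," s then idx :: pvConvWith rest (idx + 1)
    else (-1) :: pvConvWith rest idx

lemma pv_foldA (seq : List String) :
    ∀ (sl : List (List String)) (oic : List Int) (idx : Int),
      seq.foldl formatAllOperonsStep (sl, oic, idx) =
        (sl ++ (seq.filter (fun s => PySem.Str.isIn "," s)).map pvParse,
         oic ++ pvConvWith seq idx,
         idx + ((seq.filter (fun s => PySem.Str.isIn "," s)).length : Int)) := by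
  induction seq with
  | nil => intro sl oic idx; simp [pvConvWith]
  | cons s rest ih =>
    intro sl oic idx
    by_cases hf : PySem.Str.isIn "," s = true
    · have hv := (pv_valid_iff s).mpr hf
      have hstep : formatAllOperonsStep (sl, oic, idx) s =
          (sl ++ [pvParse s], oic ++ [idx], idx + 1) := by
        simp only [formatAllOperonsStep]
        rw [if_pos hv, pv_parse_eq s]
      simp only [List.foldl_cons, hstep]
      rw [ih]
      simp only [List.filter_cons, hf, if_pos, pvConvWith, List.map_cons,
        List.length_cons, List.append_assoc, List.singleton_append, Prod.mk.injEq]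
      refine ⟨trivial, trivial, ?_⟩
      push_cast
      ring
    · have hv : ¬ (((PySem.Str.split? (PySem.Str.replace (PySem.Str.replace
          (PySem.Str.replace s "-" "") "[" "") "]" "") ",").getD []).length > 1) :=
        fun h => hf ((pv_valid_iff s).mp h)
      have hstep : formatAllOperonsStep (sl, oic, idx) s = (sl, oic ++ [(-1 : Int)], idx) := by
        simp only [formatAllOperonsStep]
        rw [if_neg hv]
      simp only [List.foldl_cons, hstep]
      rw [ih]
      simp only [List.filter_cons, hf, pvConvWith, List.append_assoc, List.singleton_append,
        Bool.false_eq_true, if_false]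

-- prefix-count description of the accumulated numbering
lemma pv_conv_eq (seq : List String) :
    ∀ (pre : List Bool),
      pvConvWith seq ((pre.count true : Int)) =
        (PySem.List.enumerate (seq.map (fun s => PySem.Str.isIn "," s)) (pre.length : Int)).map
          (fun p => if p.2 then
              ((PySem.List.slice (pre ++ seq.map (fun s => PySem.Str.isIn "," s))
                  none (some p.1)).count true : Int)
            else -1) := by
  induction seq with
  | nil => intro pre; simp [pvConvWith]
  | cons s rest ih =>
    intro pre
    have hslice : ∀ (b : Bool) (l : List Bool),
        PySem.List.slice (pre ++ b :: l) none (some (pre.length : Int)) = pre := by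
      intro b l
      rw [PySem.List.slice_to_natCast, List.take_left]
    have htail := ih (pre ++ [PySem.Str.isIn "," s])
    have h2 : (((pre ++ [PySem.Str.isIn "," s]).length : Nat) : Int) = (pre.length : Int) + 1 := by
      simp
    have h3 : (pre ++ [PySem.Str.isIn "," s]) ++ rest.map (fun s => PySem.Str.isIn "," s)
        = pre ++ PySem.Str.isIn "," s :: rest.map (fun s => PySem.Str.isIn "," s) := by
      simp
    cases hf : PySem.Str.isIn "," s with
    | true =>
      have h1 : ((pre ++ [PySem.Str.isIn "," s]).count true : Int) = (pre.count true : Int) + 1 := by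
        rw [List.count_append, hf]
        simp
      rw [h1, h2, h3, hf] at htail
      simp only [List.map_cons, PySem.List.enumerate_cons, pvConvWith, hf, if_pos, List.map_cons,
        hslice, htail]
    | false =>
      have h1 : ((pre ++ [PySem.Str.isIn "," s]).count true : Int) = (pre.count true : Int) := by
        rw [List.count_append, hf]
        simp
      rw [h1, h2, h3, hf] at htail
      simp only [List.map_cons, PySem.List.enumerate_cons, pvConvWith, hf, Bool.false_eq_true,
        if_false, List.map_cons, hslice, htail]

-- ===== VERDICT (by name: the statement is the Claim_ definition above) =====
theorem formatAllOperons_spec : Claim_equal_formatAllOperons := by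
  intro sequence _
  unfold Spec_formatAllOperons formatAllOperons formatAllOperons_alt
  rw [pv_foldA]
  simp only [List.nil_append]
  refine Prod.ext ?_ ?_
  · show (sequence.filter (fun s => PySem.Str.isIn "," s)).map pvParse = _
    rw [← List.map_prod_left_eq_zip, List.filter_map, List.map_map]
    rfl
  · show pvConvWith sequence 0 = _
    have h := pv_conv_eq sequence []
    simpa using h
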